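-- pv_equiv track=rewrite | github.com/BrianAnakPintar/advent-of-code | 2025/day02/main.py | is_duplicate_of_size
-- ===== SOURCE A (Python) =====
-- def is_duplicate_of_size(id, size):
--     if len(id) % size != 0:
--         return False
--
--     num_sizes = len(id)//size
--     for outer in range(1, num_sizes):
--         for i in range(size):
--             if id[i] != id[i+size*outer]:
--                 return False
--     return True
-- ===== SOURCE B (Python) =====
-- def is_duplicate_of_size(id, size):
--     if len(id) % size != 0:
--         return False
--     return id[:size] * (len(id) // size) == id
-- ===== Notes on version B (the rewrite author's own statement) =====
-- stated objective: simpler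
-- what changed: Replaces the nested block-by-block index loops with building the expected repetition id[:size]*(len(id)//size) once and comparing it to id.
-- intended difference: For a negative size that divides the length of a nonempty id (e.g. ('ab', -2)) A returns True only because range(1, negative) is empty, while B returns False, the intended answer since a sequence cannot be a repetition of a negative-sized block. — e.g. on is_duplicate_of_size("ab", -2): A returns true, B returns false
import Mathlib
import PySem

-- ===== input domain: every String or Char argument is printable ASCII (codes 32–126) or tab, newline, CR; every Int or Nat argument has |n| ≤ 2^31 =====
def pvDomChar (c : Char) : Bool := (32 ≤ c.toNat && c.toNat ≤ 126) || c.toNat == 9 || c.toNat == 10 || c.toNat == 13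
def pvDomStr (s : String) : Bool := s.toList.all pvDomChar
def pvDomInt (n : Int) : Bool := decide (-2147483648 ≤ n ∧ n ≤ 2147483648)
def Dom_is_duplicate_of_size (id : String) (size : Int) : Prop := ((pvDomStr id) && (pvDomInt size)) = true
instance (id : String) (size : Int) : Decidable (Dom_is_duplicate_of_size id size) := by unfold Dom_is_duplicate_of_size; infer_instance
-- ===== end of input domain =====

-- B builds the expected repetition id[:size] * (len(id)//size) once and compares it to id,
-- instead of A's nested block-by-block index loops (objective: simpler).

-- ===== PORT A =====
def is_duplicate_of_size (id : String) (size : Int) : Bool :=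
  let cs := id.toList
  let n : Int := (cs.length : Int)
  if PySem.Int.mod n size ≠ 0 then false
  else
    let num_sizes := PySem.Int.floordiv n size
    (PySem.List.pyRange 1 num_sizes 1).all (fun outer =>
      (PySem.List.pyRange 0 size 1).all (fun i =>
        PySem.Str.pyGet? id i == PySem.Str.pyGet? id (i + size * outer)))

-- ===== PORT B =====
-- Python's `seq * k` with k ≤ 0 is empty, matching Int.toNat's clamping.
def is_duplicate_of_size_alt (id : String) (size : Int) : Bool :=
  let cs := id.toList
  let n : Int := (cs.length : Int)
  if PySem.Int.mod n size ≠ 0 then false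
  else
    let num_sizes := PySem.Int.floordiv n size
    (List.replicate num_sizes.toNat (PySem.List.slice cs none (some size))).flatten == cs

-- ===== PRECONDITION & SPEC =====
-- Pre_ excludes only size = 0, on which Python's `len(id) % size` raises ZeroDivisionError (in A and in B).
def Pre_is_duplicate_of_size (id : String) (size : Int) : Prop := size ≠ 0
instance (id : String) (size : Int) : Decidable (Pre_is_duplicate_of_size id size) := by
  unfold Pre_is_duplicate_of_size; infer_instance
def pvWitness_is_duplicate_of_size : String × Int := ("abab", 2)

-- For a negative size that divides the length of a nonempty id (e.g. ("ab", -2)) A returns True only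
-- because range(1, negative) is empty, while B returns False, the intended answer since a sequence
-- cannot be a repetition of a negative-sized block.
def D_is_duplicate_of_size (id : String) (size : Int) : Prop :=
  size < 0 ∧ id.toList ≠ [] ∧ size ∣ (id.toList.length : Int)
instance (id : String) (size : Int) : Decidable (D_is_duplicate_of_size id size) := by
  unfold D_is_duplicate_of_size; infer_instance

def Spec_is_duplicate_of_size (id : String) (size : Int) (out : Bool) : Prop :=
  ¬ D_is_duplicate_of_size id size → out = is_duplicate_of_size_alt id size
instance (id : String) (size : Int) (out : Bool) : Decidable (Spec_is_duplicate_of_size id size out) := by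
  unfold Spec_is_duplicate_of_size; infer_instance

def pvDiffWitness_is_duplicate_of_size : String × Int := ("ab", -2)
def pvDiffWitnessOut_is_duplicate_of_size : Bool × Bool := (true, false)

-- ===== CLAIM (what is proved, stated in full; the proofs are below) =====
def Claim_unchanged_is_duplicate_of_size : Prop :=
  ∀ (id : String) (size : Int), Dom_is_duplicate_of_size id size →
    Pre_is_duplicate_of_size id size →
    Spec_is_duplicate_of_size id size (is_duplicate_of_size id size)
def Claim_changed_is_duplicate_of_size : Prop :=
  Dom_is_duplicate_of_size (pvDiffWitness_is_duplicate_of_size.1) (pvDiffWitness_is_duplicate_of_size.2) ∧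
  Pre_is_duplicate_of_size (pvDiffWitness_is_duplicate_of_size.1) (pvDiffWitness_is_duplicate_of_size.2) ∧
  D_is_duplicate_of_size (pvDiffWitness_is_duplicate_of_size.1) (pvDiffWitness_is_duplicate_of_size.2) ∧
  is_duplicate_of_size (pvDiffWitness_is_duplicate_of_size.1) (pvDiffWitness_is_duplicate_of_size.2) = pvDiffWitnessOut_is_duplicate_of_size.1 ∧
  is_duplicate_of_size_alt (pvDiffWitness_is_duplicate_of_size.1) (pvDiffWitness_is_duplicate_of_size.2) = pvDiffWitnessOut_is_duplicate_of_size.2 ∧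
  pvDiffWitnessOut_is_duplicate_of_size.1 ≠ pvDiffWitnessOut_is_duplicate_of_size.2
def Claim_exact_is_duplicate_of_size : Prop :=
  ∀ (id : String) (size : Int), Dom_is_duplicate_of_size id size →
    Pre_is_duplicate_of_size id size → D_is_duplicate_of_size id size →
    is_duplicate_of_size id size ≠ is_duplicate_of_size_alt id size


-- ===== LEMMAS AND PROOFS =====

theorem pv_length_flatten_replicate (l : List Char) (m : Nat) :
    ((List.replicate m l).flatten).length = m * l.length := by
  simp [List.length_flatten, List.map_replicate, List.sum_replicate]

theorem pv_getElem?_flatten_replicate (l : List Char) :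
    ∀ (m j : Nat), j < m * l.length →
      ((List.replicate m l).flatten)[j]? = l[j % l.length]? := by
  intro m
  induction m with
  | zero => intro j hj; omega
  | succ m ih =>
    intro j hj
    have hpos : 0 < l.length := by
      rcases Nat.eq_zero_or_pos l.length with h | h
      · simp [h] at hj
      · exact h
    rw [List.replicate_succ, List.flatten_cons]
    by_cases hcase : j < l.length
    · rw [List.getElem?_append_left hcase, Nat.mod_eq_of_lt hcase]
    · have hge : l.length ≤ j := by omega
      rw [Nat.succ_mul] at hj
      rw [List.getElem?_append_right hge, ih (j - l.length) (by omega)]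
      rw [Nat.mod_eq_sub_mod hge]

theorem pv_flatten_replicate_iff (l : List Char) (m : Nat) (cs : List Char)
    (hlen : cs.length = m * l.length) :
    (List.replicate m l).flatten = cs ↔
      ∀ j, j < cs.length → cs[j]? = l[j % l.length]? := by
  constructor
  · intro h j hj
    rw [← h]
    exact pv_getElem?_flatten_replicate l m j (by omega)
  · intro h
    apply List.ext_getElem?
    intro i
    by_cases hi : i < m * l.length
    · rw [pv_getElem?_flatten_replicate l m i hi, h i (by omega)]
    · rw [List.getElem?_eq_none (by rw [pv_length_flatten_replicate]; omega),
          List.getElem?_eq_none (by omega)]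

theorem pv_blocks_iff (cs : List Char) (s m : Nat) (hs : 0 < s) :
    (∀ (o i : Nat), 1 ≤ o → o < m → i < s → cs[i]? = cs[i + s * o]?) ↔
      (∀ j, j < m * s → cs[j]? = cs[j % s]?) := by
  have hms : m * s = s * m := Nat.mul_comm m s
  constructor
  · intro h j hj
    rcases Nat.eq_zero_or_pos (j / s) with ho | ho
    · have : j < s := by
        rcases Nat.lt_or_ge j s with h' | h'
        · exact h'
        · exact absurd (Nat.one_le_div_iff hs |>.mpr h') (by omega)
      rw [Nat.mod_eq_of_lt this]
    · have hom : j / s < m := Nat.div_lt_of_lt_mul (by omega)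
      have hj2 : j = j % s + s * (j / s) := by
        have := Nat.mod_add_div j s; omega
      have key := h (j / s) (j % s) ho hom (Nat.mod_lt _ hs)
      rw [← hj2] at key
      exact key.symm
  · intro h o i ho hom hi
    have hiso : i + s * o < m * s := by
      have h1 : o + 1 ≤ m := hom
      have h2 : s * (o + 1) ≤ s * m := Nat.mul_le_mul_left s h1
      have h3 : s * o + s ≤ s * m := by rw [Nat.mul_add] at h2; omega
      have : m * s = s * m := Nat.mul_comm m s
      omega
    have h1 := h (i + s * o) hiso
    have h2 := h i (by
      have : s * 1 ≤ s * m := Nat.mul_le_mul_left s (by omega)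
      have : m * s = s * m := Nat.mul_comm m s
      omega)
    rw [Nat.add_mul_mod_self_left] at h1
    rw [Nat.mod_eq_of_lt hi] at h1 h2
    rw [h1]

-- A = B on every input with size ≠ 0 outside D_
theorem pv_main (id : String) (size : Int) (hpre : size ≠ 0)
    (hnD : ¬ D_is_duplicate_of_size id size) :
    is_duplicate_of_size id size = is_duplicate_of_size_alt id size := by
  unfold is_duplicate_of_size is_duplicate_of_size_alt
  set cs := id.toList with hcs
  by_cases hmod : PySem.Int.mod (cs.length : Int) size = 0
  case neg => simp [hmod]
  case pos =>
    have hdvd : size ∣ (cs.length : Int) :=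
      (PySem.Int.mod_eq_zero_iff_dvd _ _).mp hmod
    simp only [hmod, ne_eq, not_true_eq_false, if_false]
    rcases lt_or_gt_of_ne hpre with hneg | hpos
    · -- size < 0: ¬D forces cs = []
      have hnil : cs = [] := by
        by_contra hne
        exact hnD ⟨hneg, hne, hdvd⟩
      rw [hnil]
      have hq : PySem.Int.floordiv ((0:Nat) : Int) size = 0 := by
        have h := PySem.Int.floordiv_mul_add_mod ((0:Nat) : Int) size
        have hm0 : PySem.Int.mod ((0:Nat) : Int) size = 0 := by
          rw [PySem.Int.mod_eq_zero_iff_dvd]; simp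
        rw [hm0] at h
        have := Int.eq_zero_or_eq_zero_of_mul_eq_zero (by simpa using h)
        tauto
      simp only [List.length_nil, hq]
      rw [PySem.List.pyRange_one_eq_nil (by omega)]
      simp
    · -- size > 0
      obtain ⟨s, rfl⟩ : ∃ s : Nat, size = (s : Int) :=
        ⟨size.toNat, (Int.toNat_of_nonneg (by omega)).symm⟩
      have hs : 0 < s := by exact_mod_cast hpos
      obtain ⟨m, hm⟩ : s ∣ cs.length := by
        rcases hdvd with ⟨c, hc⟩
        refine ⟨c.toNat, ?_⟩
        have hc0 : 0 ≤ c := by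
          by_contra hlt
          have : (s : Int) * c < 0 :=
            mul_neg_of_pos_of_neg (by exact_mod_cast hs) (by omega)
          omega
        have : (cs.length : Int) = ((s * c.toNat : Nat) : Int) := by
          push_cast; rw [Int.toNat_of_nonneg hc0]; exact hc
        exact_mod_cast this
      have hms : m * s = s * m := Nat.mul_comm m s
      have hfd : PySem.Int.floordiv (cs.length : Int) ((s:Nat) : Int) = ((cs.length / s : Nat) : Int) :=
        PySem.Int.floordiv_natCast _ _
      have hdivm : cs.length / s = m := by rw [hm, Nat.mul_div_cancel_left _ hs]
      rw [hfd, hdivm]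
      have hslice : PySem.List.slice cs none (some ((s:Nat) : Int)) = cs.take s :=
        PySem.List.slice_to_natCast _ _
      rw [hslice, Int.toNat_natCast]
      rcases Nat.eq_zero_or_pos m with hm0 | hm1
      · -- m = 0: cs = []
        have : cs = [] := by
          apply List.eq_nil_of_length_eq_zero
          rw [hm, hm0, Nat.mul_zero]
        rw [hm0, this]
        rw [PySem.List.pyRange_one_eq_nil (by omega)]
        simp
      · -- m ≥ 1: the real case
        have hlt : (cs.take s).length = s := by
          rw [List.length_take]
          have : s ≤ s * m := Nat.le_mul_of_pos_right s hm1
          omega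
        rw [Bool.eq_iff_iff]
        rw [List.all_eq_true, beq_iff_eq]
        rw [pv_flatten_replicate_iff _ _ _ (by rw [hlt, hm]; ring)]
        have htake : ∀ k, k < s → (cs.take s)[k]? = cs[k]? := by
          intro k hk
          rw [List.getElem?_take, if_pos hk]
        constructor
        · intro h j hj
          rw [hlt, htake (j % s) (Nat.mod_lt _ hs)]
          refine (pv_blocks_iff cs s m hs).mp ?_ j (by omega)
          intro o i ho hom hi
          have ho' := h (o : Int) (by
            rw [PySem.List.mem_pyRange_one]
            constructor
            · exact_mod_cast ho
            · exact_mod_cast hom)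
          rw [List.all_eq_true] at ho'
          have hi' := ho' (i : Int) (by
            rw [PySem.List.mem_pyRange_one]
            constructor
            · exact_mod_cast Nat.zero_le i
            · exact_mod_cast hi)
          rw [beq_iff_eq] at hi'
          have hcast : ((i : Int) + (s : Int) * (o : Int)) = ((i + s * o : Nat) : Int) := by
            push_cast; ring
          rw [hcast] at hi'
          rw [PySem.Str.pyGet?_natCast, PySem.Str.pyGet?_natCast, ← hcs] at hi'
          exact hi'
        · intro h o hoMem
          rw [List.all_eq_true]
          intro i hiMem
          rw [PySem.List.mem_pyRange_one] at hoMem hiMem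
          obtain ⟨o', rfl⟩ : ∃ o' : Nat, o = (o' : Int) :=
            ⟨o.toNat, (Int.toNat_of_nonneg (by omega)).symm⟩
          obtain ⟨i', rfl⟩ : ∃ i' : Nat, i = (i' : Int) :=
            ⟨i.toNat, (Int.toNat_of_nonneg (by omega)).symm⟩
          have hcast : ((i' : Int) + (s : Int) * (o' : Int)) = ((i' + s * o' : Nat) : Int) := by
            push_cast; ring
          rw [beq_iff_eq, hcast, PySem.Str.pyGet?_natCast, PySem.Str.pyGet?_natCast, ← hcs]
          refine (pv_blocks_iff cs s m hs).mpr ?_ o' i'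
            (by exact_mod_cast hoMem.1) (by exact_mod_cast hoMem.2)
            (by exact_mod_cast hiMem.2)
          intro j hj
          have := h j (by omega)
          rw [hlt, htake (j % s) (Nat.mod_lt _ hs)] at this
          exact this


-- ===== VERDICT (by name: the statement is the Claim_ definition above) =====
theorem is_duplicate_of_size_spec : Claim_unchanged_is_duplicate_of_size := by
  intro id size _ hpre hnD
  exact pv_main id size hpre hnD

theorem is_duplicate_of_size_changed : Claim_changed_is_duplicate_of_size := by
  unfold Claim_changed_is_duplicate_of_size; decide

theorem is_duplicate_of_size_tight : Claim_exact_is_duplicate_of_size := by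
  intro id size _ hpre hD
  obtain ⟨hneg, hne, hdvd⟩ := hD
  unfold is_duplicate_of_size is_duplicate_of_size_alt
  set cs := id.toList with hcs
  have hmod : PySem.Int.mod (cs.length : Int) size = 0 :=
    (PySem.Int.mod_eq_zero_iff_dvd _ _).mpr hdvd
  simp only [hmod, ne_eq, not_true_eq_false, if_false]
  have hlen : 1 ≤ (cs.length : Int) := by
    have : cs.length ≠ 0 := fun h => hne (List.eq_nil_of_length_eq_zero h)
    omega
  have hqneg : PySem.Int.floordiv (cs.length : Int) size < 0 := by
    have h := PySem.Int.floordiv_mul_add_mod (cs.length : Int) size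
    rw [hmod] at h
    by_contra hge
    have h0 : 0 ≤ PySem.Int.floordiv (cs.length : Int) size := by omega
    have : PySem.Int.floordiv (cs.length : Int) size * size ≤ 0 :=
      mul_nonpos_of_nonneg_of_nonpos h0 (by omega)
    omega
  rw [PySem.List.pyRange_one_eq_nil (by omega)]
  rw [Int.toNat_of_nonpos (by omega)]
  simp only [List.all_nil, List.replicate_zero, List.flatten_nil]
  intro hcontra
  have : ([] : List Char) = cs := by
    have := (beq_iff_eq).mp hcontra.symm ▸ hcontra
    exact beq_iff_eq.mp hcontra.symm
  exact hne this.symm
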